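-- pv_equiv track=rewrite | github.com/Christian74D/Timetablo | core/ref.py | count_same_day_subject_conflicts
-- ===== SOURCE A (Python) =====
-- def count_same_day_subject_conflicts(gene):
--     def has_duplicates(lst):
--         return len(lst) != len(set(lst))
--
--     conflicts = 0
--
--     for day in range(len(gene)):
--         for sec in range(len(gene[0][0])):
--             subjects = [gene[day][hour][sec] for hour in range(len(gene[0])) if gene[day][hour][sec] is not None]
--             if has_duplicates(subjects):
--                 conflicts += 1
--
--     return conflicts
-- ===== SOURCE B (Python) =====
-- def count_same_day_subject_conflicts(gene):
--     if not gene: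
--         return 0
--     hours = len(gene[0])
--     sections = len(gene[0][0])
--     total = 0
--     for rows in gene:
--         for sec in range(sections):
--             if any(h < k
--                    and rows[h][sec] is not None
--                    and rows[h][sec] == rows[k][sec]
--                    for h in range(hours) for k in range(hours)):
--                 total += 1
--     return total
-- ===== Notes on version B (the rewrite author's own statement) =====
-- stated objective: alternative
-- what changed: Per (day, section) column, A materialises the list of non-None subjects and tests len(lst) != len(set(lst)); B instead scans pairs of hour slots directly and counts the column if two equal non-None cells exist, with the day iterated by element rather than by index.
import Mathlib
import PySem

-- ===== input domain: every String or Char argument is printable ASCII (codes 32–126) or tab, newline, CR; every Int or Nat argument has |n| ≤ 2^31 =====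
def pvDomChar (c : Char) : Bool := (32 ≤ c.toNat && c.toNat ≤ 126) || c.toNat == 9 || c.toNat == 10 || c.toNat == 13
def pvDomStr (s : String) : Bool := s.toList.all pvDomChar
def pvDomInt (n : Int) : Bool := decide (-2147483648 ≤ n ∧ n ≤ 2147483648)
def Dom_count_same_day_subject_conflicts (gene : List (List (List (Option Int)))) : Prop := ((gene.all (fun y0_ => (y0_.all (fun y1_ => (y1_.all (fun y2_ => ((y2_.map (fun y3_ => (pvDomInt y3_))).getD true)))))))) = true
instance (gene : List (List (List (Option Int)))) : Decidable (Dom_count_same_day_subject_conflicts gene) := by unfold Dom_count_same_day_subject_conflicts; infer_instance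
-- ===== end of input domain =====

-- B replaces A's per-column "build the subject list, then compare its length with the
-- length of its set" duplicate test by a direct pairwise scan for two equal non-None
-- cells in the same (day, section) column (objective: alternative decomposition).

-- ===== PORT A =====
def count_same_day_subject_conflicts (gene : List (List (List (Option Int)))) : Int :=
  -- has_duplicates(lst) = len(lst) != len(set(lst))
  let hasDup : List Int → Bool := fun lst => lst.length != (PySem.Set.ofList lst).length
  (PySem.List.pyRange 0 (gene.length : Int) 1).foldl (fun conflicts day =>
    (PySem.List.pyRange 0 ((PySem.List.pyGetD (PySem.List.pyGetD gene 0 []) 0 []).length : Int) 1).foldl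
      (fun conflicts sec =>
        let subjects := (PySem.List.pyRange 0 ((PySem.List.pyGetD gene 0 []).length : Int) 1).filterMap
          (fun hour => PySem.List.pyGetD (PySem.List.pyGetD (PySem.List.pyGetD gene day []) hour []) sec none)
        if hasDup subjects then conflicts + 1 else conflicts)
      conflicts) 0

-- ===== PORT B =====
def count_same_day_subject_conflicts_alt (gene : List (List (List (Option Int)))) : Int :=
  match gene with
  | [] => 0
  | d0 :: _ =>
    let hours := d0.length
    let sections := (d0.headD []).length
    gene.foldl (fun total rows =>
      (List.range sections).foldl (fun total sec =>
        if (List.range hours).any (fun h => (List.range hours).any (fun k =>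
              decide (h < k) &&
              ((rows.getD h []).getD sec none != none &&
               ((rows.getD h []).getD sec none == (rows.getD k []).getD sec none))))
        then total + 1 else total) total) 0

-- ===== PRECONDITION & SPEC =====
-- Pre_ excludes exactly the inputs where Python A raises IndexError: a non-empty gene
-- whose first day is empty, or (when gene[0][0] is non-empty, so columns are scanned at all)
-- whose rows are too ragged for the gene[0]-derived bounds.
def Pre_count_same_day_subject_conflicts (gene : List (List (List (Option Int)))) : Prop :=
  ∀ day ∈ gene, gene.headD [] ≠ [] ∧
    (((gene.headD []).headD []).length = 0 ∨
      ((gene.headD []).length ≤ day.length ∧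
       ∀ row ∈ day.take (gene.headD []).length, ((gene.headD []).headD []).length ≤ row.length))
instance (gene : List (List (List (Option Int)))) : Decidable (Pre_count_same_day_subject_conflicts gene) := by
  unfold Pre_count_same_day_subject_conflicts; infer_instance

def pvWitness_count_same_day_subject_conflicts : List (List (List (Option Int))) :=
  [[[some 1, none], [some 1, some 2]]]

def Spec_count_same_day_subject_conflicts (gene : List (List (List (Option Int)))) (out : Int) : Prop := out = count_same_day_subject_conflicts_alt gene
instance (gene : List (List (List (Option Int)))) (out : Int) : Decidable (Spec_count_same_day_subject_conflicts gene out) := by unfold Spec_count_same_day_subject_conflicts; infer_instance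

-- ===== CLAIM (what is proved, stated in full; the proofs are below) =====
def Claim_equal_count_same_day_subject_conflicts : Prop := ∀ (gene : List (List (List (Option Int)))), Dom_count_same_day_subject_conflicts gene → Pre_count_same_day_subject_conflicts gene → Spec_count_same_day_subject_conflicts gene (count_same_day_subject_conflicts gene)

-- ===== LEMMAS AND PROOFS =====

-- len(set(l)) < len(l) when l has a duplicate
theorem pv_length_ofList_lt {l : List Int} (h : ¬ l.Nodup) :
    (PySem.Set.ofList l).length < l.length := by
  induction l with
  | nil => exact absurd List.nodup_nil h
  | cons x xs ih =>
    rw [PySem.Set.ofList_cons]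
    by_cases hx : x ∈ xs
    · have hmem : x ∈ PySem.Set.ofList xs := (PySem.Set.mem_ofList xs x).mpr hx
      have hlt : ((PySem.Set.ofList xs).discard x).length < (PySem.Set.ofList xs).length := by
        unfold PySem.Set.discard
        exact List.length_filter_lt_length_iff_exists.mpr ⟨x, hmem, by simp⟩
      have := PySem.Set.length_ofList_le xs
      simp only [List.length_cons]
      omega
    · have hxs : ¬ xs.Nodup := by
        intro hn; exact h (List.nodup_cons.mpr ⟨hx, hn⟩)
      have h1 := ih hxs
      have h2 : ((PySem.Set.ofList xs).discard x).length ≤ (PySem.Set.ofList xs).length :=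
        List.length_filter_le _ _
      simp only [List.length_cons]
      omega

-- has_duplicates(l) ↔ ¬ l.Nodup
theorem pv_hasDup_iff (l : List Int) :
    (l.length != (PySem.Set.ofList l).length) = true ↔ ¬ l.Nodup := by
  constructor
  · intro h hn
    rw [PySem.Set.ofList_eq_self_of_nodup l hn] at h
    simp at h
  · intro h
    have := pv_length_ofList_lt h
    simp only [bne_iff_ne, ne_eq]
    omega

-- two equal non-none cells at distinct positions of c ↔ the filterMap of c has a duplicate
theorem pv_pairs_iff (c : List (Option Int)) :
    (∃ h k : Nat, h < k ∧ k < c.length ∧ c.getD h none ≠ none ∧ c.getD h none = c.getD k none)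
      ↔ ¬ (c.filterMap id).Nodup := by
  induction c with
  | nil => simp
  | cons x xs ih =>
    have shift : (∃ h k : Nat, h < k ∧ k < (x :: xs).length ∧
        (x :: xs).getD h none ≠ none ∧ (x :: xs).getD h none = (x :: xs).getD k none)
        ↔ ((x ≠ none ∧ ∃ k' : Nat, k' < xs.length ∧ x = xs.getD k' none) ∨
           (∃ h k : Nat, h < k ∧ k < xs.length ∧ xs.getD h none ≠ none ∧
             xs.getD h none = xs.getD k none)) := by
      constructor
      · rintro ⟨h, k, hhk, hk, hne, heq⟩
        match h, k with
        | 0, k'+1 =>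
          left
          simp only [List.getD_cons_zero] at hne heq
          simp only [List.getD_cons_succ] at heq
          simp only [List.length_cons] at hk
          exact ⟨hne, k', by omega, heq⟩
        | h'+1, k'+1 =>
          right
          simp only [List.getD_cons_succ] at hne heq
          simp only [List.length_cons] at hk
          exact ⟨h', k', by omega, by omega, hne, heq⟩
      · rintro (⟨hne, k', hk', heq⟩ | ⟨h, k, hhk, hk, hne, heq⟩)
        · exact ⟨0, k'+1, by omega, by simp; omega, by simpa using hne, by simpa using heq⟩
        · exact ⟨h+1, k+1, by omega, by simp; omega, by simpa using hne, by simpa using heq⟩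
    rw [shift]
    cases x with
    | none =>
      simp only [List.filterMap_cons, id]
      constructor
      · rintro (⟨hne, _⟩ | hp)
        · exact absurd rfl hne
        · exact ih.mp hp
      · intro h; exact Or.inr (ih.mpr h)
    | some v =>
      simp only [List.filterMap_cons, id, List.nodup_cons, not_and_or]
      constructor
      · rintro (⟨_, k', hk', heq⟩ | hp)
        · left
          intro hmem
          apply hmem
          rw [List.mem_filterMap]
          refine ⟨some v, ?_, rfl⟩
          have : xs.getD k' none = some v := heq.symm
          have := List.getD_eq_getElem (l := xs) (d := none) hk'
          rw [this] at ‹xs.getD k' none = some v›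
          rw [← ‹xs[k'] = some v›]
          exact List.getElem_mem hk'
        · exact Or.inr (ih.mp hp)
      · rintro (hmem | hnd)
        · left
          simp only [not_not, List.mem_filterMap] at hmem
          obtain ⟨o, ho, hov⟩ := hmem
          obtain ⟨i, hi, hgi⟩ := List.mem_iff_getElem.mp ho
          refine ⟨by simp, i, hi, ?_⟩
          rw [List.getD_eq_getElem (l := xs) (d := none) hi, hgi, hov]
        · exact Or.inr (ih.mpr hnd)

-- per-column: A's duplicate test equals B's pairwise test
theorem pv_column_eq (rows : List (List (Option Int))) (hours sec : Nat) :
    (((PySem.List.pyRange 0 (hours : Int) 1).filterMap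
        (fun hour => PySem.List.pyGetD (PySem.List.pyGetD rows hour []) (sec : Int) none)).length !=
      (PySem.Set.ofList ((PySem.List.pyRange 0 (hours : Int) 1).filterMap
        (fun hour => PySem.List.pyGetD (PySem.List.pyGetD rows hour []) (sec : Int) none))).length) =
    (List.range hours).any (fun h => (List.range hours).any (fun k =>
        decide (h < k) &&
        ((rows.getD h []).getD sec none != none &&
         ((rows.getD h []).getD sec none == (rows.getD k []).getD sec none)))) := by
  have hcell : ∀ h : Nat,
      PySem.List.pyGetD (PySem.List.pyGetD rows (h : Int) []) (sec : Int) none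
        = (rows.getD h []).getD sec none := by
    intro h
    rw [PySem.List.pyGetD_natCast, PySem.List.pyGetD_natCast]
  set f : Nat → Option Int := fun h => (rows.getD h []).getD sec none with hf
  have hsubj : (PySem.List.pyRange 0 (hours : Int) 1).filterMap
      (fun hour => PySem.List.pyGetD (PySem.List.pyGetD rows hour []) (sec : Int) none)
      = ((List.range hours).map f).filterMap id := by
    rw [PySem.List.pyRange_zero_natCast, List.filterMap_map, List.filterMap_map]
    apply List.filterMap_congr
    intro x _
    simp only [Function.comp, hcell, hf, id]
  rw [hsubj]
  set c : List (Option Int) := (List.range hours).map f with hc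
  rw [Bool.eq_iff_iff, pv_hasDup_iff, ← pv_pairs_iff]
  have hcget : ∀ i : Nat, i < hours → c.getD i none = f i := by
    intro i hi
    rw [hc, List.getD_eq_getElem?_getD, List.getElem?_map, List.getElem?_range hi]
    rfl
  have hclen : c.length = hours := by simp [hc]
  constructor
  · rintro ⟨h, k, hhk, hk, hne, heq⟩
    rw [hclen] at hk
    rw [hcget h (by omega)] at hne heq
    rw [hcget k hk] at heq
    simp only [List.any_eq_true, List.mem_range]
    refine ⟨h, by omega, k, hk, ?_⟩
    simp only [hf] at hne heq
    simp only [Bool.and_eq_true, decide_eq_true_eq, bne_iff_ne, ne_eq, beq_iff_eq]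
    exact ⟨hhk, hne, heq⟩
  · intro hany
    simp only [List.any_eq_true, List.mem_range, Bool.and_eq_true, decide_eq_true_eq,
      bne_iff_ne, ne_eq, beq_iff_eq] at hany
    obtain ⟨h, hh, k, hk, hhk, hne, heq⟩ := hany
    exact ⟨h, k, hhk, by omega, by rw [hcget h hh]; exact hne, by rw [hcget h hh, hcget k hk]; exact heq⟩

-- ===== VERDICT (by name: the statement is the Claim_ definition above) =====
theorem count_same_day_subject_conflicts_spec : Claim_equal_count_same_day_subject_conflicts := by
  intro gene _ _
  unfold Spec_count_same_day_subject_conflicts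
  unfold count_same_day_subject_conflicts count_same_day_subject_conflicts_alt
  cases gene with
  | nil => simp [PySem.List.pyRange_one_eq_nil]
  | cons d0 rest =>
    simp only []
    have h0 : PySem.List.pyGetD (d0 :: rest) 0 [] = d0 := PySem.List.pyGetD_zero_cons _ _ _
    rw [h0]
    have hhead : PySem.List.pyGetD d0 0 [] = d0.headD [] := by
      cases d0 with
      | nil => rfl
      | cons r rs => rw [PySem.List.pyGetD_zero_cons]; rfl
    rw [hhead]
    rw [PySem.List.foldl_pyRange_zero_pyGetD' (d0 :: rest) []
      (fun conflicts rows =>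
        (PySem.List.pyRange 0 ((d0.headD []).length : Int) 1).foldl
          (fun conflicts sec =>
            if ((PySem.List.pyRange 0 (d0.length : Int) 1).filterMap
                  (fun hour => PySem.List.pyGetD (PySem.List.pyGetD rows hour []) sec none)).length !=
               (PySem.Set.ofList ((PySem.List.pyRange 0 (d0.length : Int) 1).filterMap
                  (fun hour => PySem.List.pyGetD (PySem.List.pyGetD rows hour []) sec none))).length
            then conflicts + 1 else conflicts) conflicts) 0]
    apply PySem.List.foldl_congr_mem
    intro acc rows _
    rw [PySem.List.pyRange_zero_natCast (d0.headD []).length, List.foldl_map]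
    apply PySem.List.foldl_congr_mem
    intro acc2 sec _
    rw [pv_column_eq rows d0.length sec]
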